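-- pv_equiv track=rewrite | github.com/WillyWilsen/Tugas2-Kriptografi | src/4/service.py | cofactor_matrix
-- ===== SOURCE A (Python) =====
-- def minor_matrix(mat, i, j):
--   return [row[:j] + row[j+1:] for row in (mat[:i] + mat[i+1:])]
--
-- def determinant_matrix(mat):
--   if len(mat) == 1:
--     return mat[0][0]
--   if len(mat) == 2:
--     return mat[0][0]*mat[1][1] - mat[0][1]*mat[1][0]
--   det = 0
--   for i in range(len(mat)):
--     det += ((-1) ** i) * mat[0][i] * determinant_matrix(minor_matrix(mat, 0, i))
--   return det
--
-- def cofactor_matrix(matrix):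
--   size = len(matrix)
--   cofactor_mat = [[0]*size for _ in range(size)]
--   for i in range(size):
--     for j in range(size):
--       minor = minor_matrix(matrix, i, j)
--       cofactor_mat[i][j] = ((-1) ** (i+j)) * determinant_matrix(minor)
--   return cofactor_mat
-- ===== SOURCE B (Python) =====
-- def _perms(items):
--     # all permutations of items, hand-rolled (A imports nothing, so no itertools)
--     if not items:
--         return [[]]
--     out = []
--     for i in range(len(items)):
--         rest = items[:i] + items[i+1:]
--         for p in _perms(rest):
--             out.append([items[i]] + p)
--     return out
--
-- def _inversions(p):
--     if not p:
--         return 0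
--     return sum(1 for x in p[1:] if p[0] > x) + _inversions(p[1:])
--
-- def _det(mat):
--     # Leibniz formula: sum over all permutations of signed products (no recursion on matrices)
--     n = len(mat)
--     total = 0
--     for p in _perms(list(range(n))):
--         term = (-1) ** _inversions(p)
--         for r in range(n):
--             term *= mat[r][p[r]]
--         total += term
--     return total
--
-- def cofactor_matrix(matrix):
--     n = len(matrix)
--     return [[(-1) ** (i + j) * _det([row[:j] + row[j+1:] for row in matrix[:i] + matrix[i+1:]])
--              for j in range(n)]
--             for i in range(n)]
-- ===== Notes on version B (the rewrite author's own statement) =====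
-- stated objective: alternative
-- what changed: B computes each cofactor determinant by the Leibniz formula -- enumerating all permutations (hand-rolled generator) and summing inversion-signed products -- instead of A's recursive Laplace minor expansion with mutated preallocated output; the empty determinant is naturally 1 (the empty permutation), not A's 0.
-- intended difference: On 1x1 matrices A returns [[0]] because its Laplace determinant of the empty 0x0 minor is 0, while B returns the mathematically correct cofactor matrix [[1]] (the empty product over the empty permutation gives det of the empty matrix = 1). — e.g. on cofactor_matrix([[5]]): A returns [[0]], B returns [[1]]
import Mathlib
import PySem

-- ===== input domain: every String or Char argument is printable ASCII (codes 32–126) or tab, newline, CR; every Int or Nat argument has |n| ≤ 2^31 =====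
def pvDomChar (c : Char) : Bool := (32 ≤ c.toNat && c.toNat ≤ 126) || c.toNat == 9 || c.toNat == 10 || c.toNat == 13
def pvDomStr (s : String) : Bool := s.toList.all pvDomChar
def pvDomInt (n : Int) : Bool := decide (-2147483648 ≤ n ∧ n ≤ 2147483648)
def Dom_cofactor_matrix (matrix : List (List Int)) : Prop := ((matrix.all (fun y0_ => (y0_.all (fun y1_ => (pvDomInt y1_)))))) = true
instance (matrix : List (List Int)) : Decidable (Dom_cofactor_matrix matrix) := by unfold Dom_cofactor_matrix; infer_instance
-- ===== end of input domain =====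

-- B computes each cofactor determinant by the Leibniz formula (enumerate all permutations,
-- sum inversion-signed products) instead of A's recursive Laplace minor expansion into a
-- preallocated mutated output (alternative algorithm, same exact values except the 1x1 corner
-- stated below, where B returns the intended value).

-- ===== PORT A =====
-- minor_matrix(mat, i, j): row[:j] + row[j+1:] for row in mat[:i] + mat[i+1:]  (slices with Nat bounds are take/drop, exact)
def minor_matrix (mat : List (List Int)) (i j : Nat) : List (List Int) :=
  (mat.take i ++ mat.drop (i+1)).map (fun row => row.take j ++ row.drop (j+1))

-- determinant_matrix(mat), recursion made structural on a fuel that is kept equal to len(mat):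
-- every recursive call is on a matrix one row shorter with one unit less fuel, so on inputs where
-- the Python returns the fuel never runs out and the 0-fuel branch is unreachable.
def determinant_matrix_go : Nat → List (List Int) → Int
  | 0, _ => 0
  | fuel+1, mat =>
    if mat.length = 1 then PySem.List.pyGetD (PySem.List.pyGetD mat 0 []) 0 0
    else if mat.length = 2 then
      PySem.List.pyGetD (PySem.List.pyGetD mat 0 []) 0 0 * PySem.List.pyGetD (PySem.List.pyGetD mat 1 []) 1 0
        - PySem.List.pyGetD (PySem.List.pyGetD mat 0 []) 1 0 * PySem.List.pyGetD (PySem.List.pyGetD mat 1 []) 0 0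
    else
      (List.range mat.length).foldl
        (fun det (i : Nat) => det + (-1 : Int)^i * PySem.List.pyGetD (PySem.List.pyGetD mat 0 []) (i : Int) 0
            * determinant_matrix_go fuel (minor_matrix mat 0 i)) 0

def determinant_matrix (mat : List (List Int)) : Int :=
  determinant_matrix_go mat.length mat

def cofactor_matrix (matrix : List (List Int)) : List (List Int) :=
  let size := matrix.length
  let init := (List.range size).map (fun _ => List.replicate size (0 : Int))
  (List.range size).foldl (fun cm i =>
    (List.range size).foldl (fun cm j =>
      cm.set i ((cm.getD i []).set j
        ((-1 : Int)^(i+j) * determinant_matrix (minor_matrix matrix i j)))) cm) init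

-- ===== PORT B =====
-- _perms(items): all permutations; recursion removes one element per call, fuel = len(items)
-- keeps it structural (the 0-fuel nonempty branch is never reached when fuel = length).
def pvPermsGo : Nat → List Nat → List (List Nat)
  | _, [] => [[]]
  | 0, _ :: _ => []
  | fuel+1, x :: xs =>
      (List.range (x :: xs).length).flatMap (fun i =>
        (pvPermsGo fuel ((x :: xs).take i ++ (x :: xs).drop (i+1))).map
          (fun p => (x :: xs).getD i 0 :: p))

-- _inversions(p): count of out-of-order pairs, recursing on the tail
def pvInversions : List Nat → Nat
  | [] => 0
  | a :: q => q.countP (fun x => decide (x < a)) + pvInversions q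

-- _det(mat): Leibniz sum over all permutations; indices r, p[r] are in-range nonnegative,
-- so plain getD is exact here.
def pvDetB (mat : List (List Int)) : Int :=
  (pvPermsGo mat.length (List.range mat.length)).foldl
    (fun total p =>
      total + (List.range mat.length).foldl
        (fun term r => term * ((mat.getD r []).getD (p.getD r 0) 0))
        ((-1 : Int) ^ pvInversions p)) 0

def pvSubmatrix (mat : List (List Int)) (i j : Nat) : List (List Int) :=
  (mat.take i ++ mat.drop (i+1)).map (fun row => row.take j ++ row.drop (j+1))

def cofactor_matrix_alt (matrix : List (List Int)) : List (List Int) :=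
  (List.range matrix.length).map (fun i =>
    (List.range matrix.length).map (fun j =>
      (-1 : Int)^(i+j) * pvDetB (pvSubmatrix matrix i j)))

-- ===== PRECONDITION & SPEC =====
-- Pre_ excludes exactly the ragged matrices on which A hits an IndexError inside a recursive
-- determinant: with at least two rows, every row must be at least as long as the number of rows.
def Pre_cofactor_matrix (matrix : List (List Int)) : Prop :=
  matrix.length ≤ 1 ∨ ∀ row ∈ matrix, matrix.length ≤ row.length
instance (matrix : List (List Int)) : Decidable (Pre_cofactor_matrix matrix) := by
  unfold Pre_cofactor_matrix; infer_instance

def pvWitness_cofactor_matrix : List (List Int) := [[1, 2], [3, 4]]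

-- On 1x1 matrices A returns [[0]] because its Laplace determinant of the empty 0x0 minor is 0,
-- while B returns the mathematically correct cofactor matrix [[1]] (the empty permutation's
-- empty product gives det of the empty matrix = 1).
def D_cofactor_matrix (matrix : List (List Int)) : Prop := matrix.length = 1
instance (matrix : List (List Int)) : Decidable (D_cofactor_matrix matrix) := by
  unfold D_cofactor_matrix; infer_instance

def Spec_cofactor_matrix (matrix : List (List Int)) (out : List (List Int)) : Prop :=
  ¬ D_cofactor_matrix matrix → out = cofactor_matrix_alt matrix
instance (matrix : List (List Int)) (out : List (List Int)) : Decidable (Spec_cofactor_matrix matrix out) := by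
  unfold Spec_cofactor_matrix; infer_instance

def pvDiffWitness_cofactor_matrix : List (List Int) := [[5]]
def pvDiffWitnessOut_cofactor_matrix : (List (List Int)) × (List (List Int)) := ([[0]], [[1]])

-- ===== CLAIM (what is proved, stated in full; the proofs are below) =====
def Claim_unchanged_cofactor_matrix : Prop := ∀ (matrix : List (List Int)), Dom_cofactor_matrix matrix → Pre_cofactor_matrix matrix → Spec_cofactor_matrix matrix (cofactor_matrix matrix)
def Claim_changed_cofactor_matrix : Prop := Dom_cofactor_matrix (pvDiffWitness_cofactor_matrix) ∧ Pre_cofactor_matrix (pvDiffWitness_cofactor_matrix) ∧ D_cofactor_matrix (pvDiffWitness_cofactor_matrix) ∧ cofactor_matrix (pvDiffWitness_cofactor_matrix) = pvDiffWitnessOut_cofactor_matrix.1 ∧ cofactor_matrix_alt (pvDiffWitness_cofactor_matrix) = pvDiffWitnessOut_cofactor_matrix.2 ∧ pvDiffWitnessOut_cofactor_matrix.1 ≠ pvDiffWitnessOut_cofactor_matrix.2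
def Claim_exact_cofactor_matrix : Prop := ∀ (matrix : List (List Int)), Dom_cofactor_matrix matrix → Pre_cofactor_matrix matrix → D_cofactor_matrix matrix → cofactor_matrix matrix ≠ cofactor_matrix_alt matrix

-- ===== LEMMAS AND PROOFS =====

-- the strictly monotone column relabelling that skips index i
def pvSkip (i c : Nat) : Nat := if c < i then c else c + 1

-- getD of a list with position i erased (take i ++ drop (i+1))
theorem pvGetD_erase {α : Type} (l : List α) (i b : Nat) (d : α) (hi : i ≤ l.length) :
    (l.take i ++ l.drop (i+1)).getD b d = if b < i then l.getD b d else l.getD (b+1) d := by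
  simp only [List.getD, List.getElem?_append, List.length_take, List.getElem?_take,
    List.getElem?_drop, Nat.min_eq_left hi]
  rcases lt_or_ge b i with h | h
  · rw [if_pos (by omega), if_pos h, if_pos h]
  · rw [if_neg (by omega), if_neg (by omega)]
    have : i + 1 + (b - i) = b + 1 := by omega
    rw [this]

-- a foldl that multiplies up the images of a list is the initial value times the product
theorem pvFoldlMul (l : List Nat) (f : Nat → Int) (init : Int) :
    l.foldl (fun t r => t * f r) init = init * (l.map f).prod := by
  induction l generalizing init with
  | nil => simp
  | cons a t ih => simp [ih, mul_assoc]

-- the sum of a flatMap is the sum of the per-block sums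
theorem pvSumFlatMap {α : Type} (l : List α) (g : α → List Int) :
    (l.flatMap g).sum = (l.map (fun x => (g x).sum)).sum := by
  induction l with
  | nil => rfl
  | cons a t ih => simp [List.flatMap_cons, ih]

-- pvPermsGo is positional: it commutes with mapping a function over the items
theorem pvPermsGo_map (fuel : Nat) : ∀ (l : List Nat) (f : Nat → Nat),
    pvPermsGo fuel (l.map f) = (pvPermsGo fuel l).map (List.map f) := by
  induction fuel with
  | zero => intro l f; cases l <;> rfl
  | succ fuel ih =>
    intro l f
    cases l with
    | nil => rfl
    | cons a t =>
      have hL : (a :: t).map f = f a :: t.map f := rfl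
      rw [hL]
      show (List.range (f a :: t.map f).length).flatMap (fun i =>
          (pvPermsGo fuel ((f a :: t.map f).take i ++ (f a :: t.map f).drop (i+1))).map
            (fun p => (f a :: t.map f).getD i 0 :: p)) = _
      conv_rhs => rw [show pvPermsGo (fuel+1) (a :: t) =
        (List.range (a :: t).length).flatMap (fun i =>
          (pvPermsGo fuel ((a :: t).take i ++ (a :: t).drop (i+1))).map
            (fun p => (a :: t).getD i 0 :: p)) from rfl]
      rw [List.map_flatMap]
      have hlen : (f a :: t.map f).length = (a :: t).length := by simp
      rw [hlen]
      apply List.flatMap_congr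
      intro i hi
      rw [List.mem_range] at hi
      have hhead : (List.map f (a :: t)).getD i 0 = f ((a :: t).getD i 0) := by
        rw [List.getD_eq_getElem _ _ (by simpa using hi), List.getD_eq_getElem _ _ hi]
        exact List.getElem_map f
      rw [← hL, ← List.map_take, ← List.map_drop, ← List.map_append, ih,
        List.map_map, List.map_map, hhead]
      apply List.map_congr_left
      intro p _
      simp [Function.comp]

-- every member of pvPermsGo (with fuel = length) is a permutation of the input list
theorem pvPermsGo_perm (fuel : Nat) : ∀ (l : List Nat), fuel = l.length →
    ∀ p ∈ pvPermsGo fuel l, p.Perm l := by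
  induction fuel with
  | zero =>
    intro l hl p hp
    cases l with
    | nil => simp [pvPermsGo] at hp; simp [hp]
    | cons a t => simp at hl
  | succ fuel ih =>
    intro l hl p hp
    cases l with
    | nil => simp at hl
    | cons a t =>
      simp only [pvPermsGo, List.mem_flatMap, List.mem_range, List.mem_map] at hp
      obtain ⟨i, hi, q, hq, rfl⟩ := hp
      have hlen : fuel = ((a :: t).take i ++ (a :: t).drop (i+1)).length := by
        rw [List.length_append, List.length_take, List.length_drop]
        omega
      have hperm := ih _ hlen q hq
      have hget : (a :: t).getD i 0 = (a :: t)[i] := List.getD_eq_getElem _ _ hi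
      rw [hget]
      refine (List.Perm.cons _ hperm).trans ?_
      have h3 : (a :: t).take i ++ (a :: t)[i] :: (a :: t).drop (i+1) = a :: t := by
        rw [← List.drop_eq_getElem_cons hi, List.take_append_drop]
      conv_rhs => rw [← h3]
      exact List.perm_middle.symm

-- relabelling through the strictly monotone pvSkip preserves the inversion count
theorem pvInversions_map_skip (i : Nat) : ∀ (q : List Nat),
    pvInversions (q.map (pvSkip i)) = pvInversions q := by
  intro q
  induction q with
  | nil => rfl
  | cons a t ih =>
    show (t.map (pvSkip i)).countP (fun x => decide (x < pvSkip i a)) + pvInversions (t.map (pvSkip i))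
        = t.countP (fun x => decide (x < a)) + pvInversions t
    rw [ih, List.countP_map]
    congr 1
    apply List.countP_congr
    intro x _
    simp only [Function.comp, pvSkip]
    split_ifs <;> simp <;> omega

-- how many elements of range m are below i
theorem pvCountPRange (m i : Nat) :
    (List.range m).countP (fun x => decide (x < i)) = min i m := by
  induction m with
  | zero => simp
  | succ m ih =>
    rw [List.range_succ, List.countP_append, ih]
    by_cases h : m < i <;> simp [h] <;> omega

-- range (m+1) with position i removed is range m relabelled through pvSkip i
theorem pvPunctureRange (m i : Nat) (hi : i < m+1) :
    (List.range (m+1)).take i ++ (List.range (m+1)).drop (i+1) = (List.range m).map (pvSkip i) := by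
  apply List.ext_getElem
  · simp only [List.length_append, List.length_take, List.length_drop, List.length_map,
      List.length_range]
    omega
  · intro b h1 h2
    have hb : b < m := by simpa using h2
    have hgd : ((List.range (m+1)).take i ++ (List.range (m+1)).drop (i+1))[b] =
        ((List.range (m+1)).take i ++ (List.range (m+1)).drop (i+1)).getD b 0 :=
      (List.getD_eq_getElem _ _ h1).symm
    rw [hgd, pvGetD_erase _ _ _ _ (by simp; omega), List.getElem_map, List.getElem_range]
    simp only [pvSkip]
    split_ifs with h
    · rw [List.getD_eq_getElem _ _ (by simp; omega), List.getElem_range]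
    · rw [List.getD_eq_getElem _ _ (by simp; omega), List.getElem_range]

-- the Leibniz sum written as a sum over the generated permutation list
theorem pvDetB_as_sum (mat : List (List Int)) :
    pvDetB mat = ((pvPermsGo mat.length (List.range mat.length)).map
      (fun p => (-1 : Int) ^ pvInversions p *
        ((List.range mat.length).map (fun r => (mat.getD r []).getD (p.getD r 0) 0)).prod)).sum := by
  unfold pvDetB
  rw [PySem.List.foldl_add, zero_add]
  congr 1
  apply List.map_congr_left
  intro p _
  exact pvFoldlMul _ _ _

-- B's Leibniz determinant satisfies the row-0 Laplace recurrence
theorem pvDetB_rec (mat : List (List Int)) (m : Nat) (hlen : mat.length = m+1)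
    (hrows : ∀ row ∈ mat, m+1 ≤ row.length) :
    pvDetB mat = ((List.range (m+1)).map (fun i =>
      (-1 : Int)^i * (mat.getD 0 []).getD i 0 * pvDetB (minor_matrix mat 0 i))).sum := by
  rw [pvDetB_as_sum, hlen]
  -- unfold one layer of the permutation generator on range (m+1)
  have hcons : List.range (m+1) = 0 :: (List.range m).map Nat.succ := List.range_succ_eq_map
  have hperms : pvPermsGo (m+1) (List.range (m+1)) =
      (List.range (m+1)).flatMap (fun i =>
        (pvPermsGo m ((List.range (m+1)).take i ++ (List.range (m+1)).drop (i+1))).map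
          (fun p => (List.range (m+1)).getD i 0 :: p)) := by
    conv_lhs => rw [hcons]
    rw [show pvPermsGo (m+1) (0 :: (List.range m).map Nat.succ) =
      (List.range (0 :: (List.range m).map Nat.succ).length).flatMap (fun i =>
        (pvPermsGo m ((0 :: (List.range m).map Nat.succ).take i ++
            (0 :: (List.range m).map Nat.succ).drop (i+1))).map
          (fun p => (0 :: (List.range m).map Nat.succ).getD i 0 :: p)) from rfl]
    rw [← hcons]
    simp [List.length_range]
  rw [hperms, List.map_flatMap, pvSumFlatMap]
  apply congrArg
  apply List.map_congr_left
  intro i hi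
  rw [List.mem_range] at hi
  -- the head item and the punctured list
  have hget : (List.range (m+1)).getD i 0 = i := by
    rw [List.getD_eq_getElem _ _ (by simpa using hi), List.getElem_range]
  rw [hget, pvPunctureRange m i hi, pvPermsGo_map, List.map_map, List.map_map]
  -- rewrite B's determinant of the minor the same way
  have hmlen : (minor_matrix mat 0 i).length = m := by
    simp [minor_matrix, hlen]
  rw [pvDetB_as_sum (minor_matrix mat 0 i), hmlen]
  rw [← PySem.List.sum_map_const_mul_int]
  apply congrArg
  apply List.map_congr_left
  intro q hq
  have hqperm : q.Perm (List.range m) := pvPermsGo_perm m (List.range m) (by simp) q hq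
  have hqlen : q.length = m := by simpa using hqperm.length_eq
  simp only [Function.comp]
  -- sign of (i :: q.map (pvSkip i))
  have hsign : pvInversions (i :: q.map (pvSkip i)) = i + pvInversions q := by
    show (q.map (pvSkip i)).countP (fun x => decide (x < i)) + pvInversions (q.map (pvSkip i))
        = i + pvInversions q
    rw [pvInversions_map_skip, List.countP_map]
    congr 1
    have : q.countP ((fun x => decide (x < i)) ∘ pvSkip i) = q.countP (fun x => decide (x < i)) := by
      apply List.countP_congr
      intro x _
      simp only [Function.comp, pvSkip]
      split_ifs <;> simp <;> omega
    rw [this, hqperm.countP_eq, pvCountPRange]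
    omega
  -- product over rows of (i :: q.map (pvSkip i))
  have hprod : ((List.range (m+1)).map
        (fun r => (mat.getD r []).getD ((i :: q.map (pvSkip i)).getD r 0) 0)).prod
      = (mat.getD 0 []).getD i 0 *
        ((List.range m).map (fun s => ((minor_matrix mat 0 i).getD s []).getD (q.getD s 0) 0)).prod := by
    rw [hcons, List.map_cons, List.map_map, List.prod_cons]
    congr 1
    apply congrArg
    apply List.map_congr_left
    intro s hs
    rw [List.mem_range] at hs
    simp only [Function.comp, Nat.succ_eq_add_one]
    have h1 : (i :: q.map (pvSkip i)).getD (s+1) 0 = (q.map (pvSkip i)).getD s 0 := rfl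
    have h2 : (q.map (pvSkip i)).getD s 0 = pvSkip i (q.getD s 0) := by
      rw [List.getD_eq_getElem _ _ (by simp [hqlen]; omega), List.getElem_map,
        List.getD_eq_getElem _ _ (by omega : s < q.length)]
    have hminor : (minor_matrix mat 0 i).getD s [] =
        (mat.getD (s+1) []).take i ++ (mat.getD (s+1) []).drop (i+1) := by
      simp only [minor_matrix, List.take_zero, List.nil_append]
      rw [List.getD_eq_getElem ((mat.drop 1).map _) _ (by simp [hlen]; omega), List.getElem_map,
        List.getElem_drop, List.getD_eq_getElem _ _ (by omega : s + 1 < mat.length)]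
      simp only [show (1:Nat) + s = s + 1 from by omega]
    have hrowlen : i ≤ (mat.getD (s+1) []).length := by
      have hmem : mat.getD (s+1) [] ∈ mat := by
        rw [List.getD_eq_getElem _ _ (by omega : s + 1 < mat.length)]
        exact List.getElem_mem _
      have := hrows _ hmem
      omega
    rw [h1, h2, hminor, pvGetD_erase _ _ _ _ hrowlen]
    simp only [pvSkip]
    split_ifs <;> rfl
  rw [hsign, hprod, pow_add]
  ring

-- the two determinant routines agree on every square-enough matrix with at least one row
theorem pvDetAB (n : Nat) : ∀ (mat : List (List Int)), mat.length = n →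
    (∀ row ∈ mat, n ≤ row.length) → 1 ≤ n → determinant_matrix mat = pvDetB mat := by
  induction n using Nat.strong_induction_on with
  | _ n IH =>
    intro mat hlen hrows hn
    match n, hn, hlen, hrows, IH with
    | 1, _, hlen, hrows, IH =>
      obtain ⟨row, rfl⟩ := List.length_eq_one_iff.mp hlen
      have hA : determinant_matrix [row] = PySem.List.pyGetD (PySem.List.pyGetD [row] 0 []) 0 0 := rfl
      have e0 : PySem.List.pyGetD [row] (0:Int) [] = row := rfl
      have hB : pvDetB [row] = 0 + (-1 : Int)^(0:Nat) * row.getD 0 0 := rfl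
      rw [hA, e0, hB, PySem.List.pyGetD_zero]
      ring
    | 2, _, hlen, hrows, IH =>
      obtain ⟨r0, r1, rfl⟩ := List.length_eq_two.mp hlen
      have h0 := hrows r0 (by simp)
      have h1 := hrows r1 (by simp)
      have c00 : 0 < r0.length := by omega
      have c01 : 1 < r0.length := by omega
      have c10 : 0 < r1.length := by omega
      have c11 : 1 < r1.length := by omega
      have hA : determinant_matrix [r0, r1]
          = PySem.List.pyGetD (PySem.List.pyGetD [r0, r1] 0 []) 0 0 * PySem.List.pyGetD (PySem.List.pyGetD [r0, r1] 1 []) 1 0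
            - PySem.List.pyGetD (PySem.List.pyGetD [r0, r1] 0 []) 1 0 * PySem.List.pyGetD (PySem.List.pyGetD [r0, r1] 1 []) 0 0 := rfl
      have e0 : PySem.List.pyGetD [r0, r1] (0:Int) [] = r0 := rfl
      have e1 : PySem.List.pyGetD [r0, r1] (1:Int) [] = r1 := rfl
      have hB : pvDetB [r0, r1] = 0 + ((-1 : Int)^(0:Nat) * r0.getD 0 0) * r1.getD 1 0
          + ((-1 : Int)^(1:Nat) * r0.getD 1 0) * r1.getD 0 0 := rfl
      rw [hA, e0, e1, hB]
      simp [pysem, c00, c01, c10, c11]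
      ring
    | (m+3), _, hlen, hrows, IH =>
      have hgo : determinant_matrix mat = (List.range mat.length).foldl
          (fun det (i : Nat) => det + (-1 : Int)^i * PySem.List.pyGetD (PySem.List.pyGetD mat 0 []) (i : Int) 0
            * determinant_matrix_go (m+2) (minor_matrix mat 0 i)) 0 := by
        rw [determinant_matrix, hlen, determinant_matrix_go]
        rw [if_neg (by omega), if_neg (by omega), hlen]
      rw [hgo, PySem.List.foldl_add, zero_add, hlen,
        pvDetB_rec mat (m+2) hlen (by simpa [hlen] using hrows)]
      apply congrArg
      apply List.map_congr_left
      intro i hi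
      rw [List.mem_range] at hi
      have hmlen : (minor_matrix mat 0 i).length = m+2 := by
        simp [minor_matrix, hlen]
      have hgo2 : determinant_matrix_go (m+2) (minor_matrix mat 0 i)
          = determinant_matrix (minor_matrix mat 0 i) := by
        rw [determinant_matrix, hmlen]
      have hmrows : ∀ row ∈ minor_matrix mat 0 i, m+2 ≤ row.length := by
        intro row hrow
        simp only [minor_matrix, List.take_zero, List.nil_append, List.mem_map] at hrow
        obtain ⟨r, hr, rfl⟩ := hrow
        have := hrows r (List.mem_of_mem_drop hr)
        simp only [List.length_append, List.length_take, List.length_drop]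
        omega
      rw [hgo2, IH (m+2) (by omega) _ hmlen hmrows (by omega)]
      have hM : PySem.List.pyGetD (PySem.List.pyGetD mat 0 []) ((i : Nat) : Int) 0
          = (mat.getD 0 []).getD i 0 := by
        simp [PySem.List.pyGetD_zero, pysem]
      rw [hM]

-- filling a list position by position with set is a map over range
theorem pvSetFill {α : Type} (g : Nat → α) : ∀ (k : Nat) (l : List α), k ≤ l.length →
    (List.range k).foldl (fun r j => r.set j (g j)) l = (List.range k).map g ++ l.drop k := by
  intro k
  induction k with
  | zero => intro l _; simp
  | succ k IH =>
    intro l hk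
    rw [List.range_succ, List.foldl_append, IH l (by omega), List.map_append]
    simp only [List.foldl_cons, List.foldl_nil, List.map_cons, List.map_nil]
    rw [List.set_append, if_neg (by simp)]
    simp only [List.length_map, List.length_range, Nat.sub_self]
    have h := List.drop_eq_getElem_cons (l := l) (i := k) (by omega)
    conv_lhs => rw [h, List.set_cons_zero]
    rw [List.append_assoc, List.singleton_append]

-- the inner j-loop only mutates row i: it equals a single set of the fully built row
theorem pvInnerCollect (i : Nat) (f : Nat → Int) : ∀ (k : Nat) (cm : List (List Int)),
    i < cm.length →
    (List.range k).foldl (fun cm j => cm.set i ((cm.getD i []).set j (f j))) cm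
      = cm.set i ((List.range k).foldl (fun r j => r.set j (f j)) (cm.getD i [])) := by
  intro k
  induction k with
  | zero =>
    intro cm hi
    simp only [List.range_zero, List.foldl_nil]
    rw [List.getD_eq_getElem _ _ hi, List.set_getElem_self]
  | succ k IH =>
    intro cm hi
    rw [List.range_succ, List.foldl_append, List.foldl_append, IH cm hi]
    simp only [List.foldl_cons, List.foldl_nil]
    have hlen : i < (cm.set i ((List.range k).foldl (fun r j => r.set j (f j)) (cm.getD i []))).length := by
      simpa using hi
    rw [List.getD_eq_getElem _ _ hlen, List.getElem_set_self, List.set_set]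

-- A's nested mutation loops build exactly the map-of-maps table
theorem pvFillAux (n : Nat) (f : Nat → Nat → Int) : ∀ (k : Nat), k ≤ n →
    (List.range k).foldl (fun cm i =>
        (List.range n).foldl (fun cm j => cm.set i ((cm.getD i []).set j (f i j))) cm)
      ((List.range n).map (fun _ => List.replicate n (0 : Int)))
    = (List.range k).map (fun i => (List.range n).map (f i))
        ++ ((List.range n).map (fun _ => List.replicate n (0 : Int))).drop k := by
  intro k
  induction k with
  | zero => intro _; simp
  | succ k IH =>
    intro hk
    rw [List.range_succ, List.foldl_append, IH (by omega)]
    simp only [List.foldl_cons, List.foldl_nil]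
    have hPlen : ((List.range k).map (fun i => (List.range n).map (f i))
        ++ ((List.range n).map (fun _ => List.replicate n (0 : Int))).drop k).length = n := by
      simp only [List.length_append, List.length_map, List.length_range, List.length_drop]
      omega
    rw [pvInnerCollect k (f k) n _ (by omega)]
    have hPget : ((List.range k).map (fun i => (List.range n).map (f i))
        ++ ((List.range n).map (fun _ => List.replicate n (0 : Int))).drop k).getD k []
        = List.replicate n (0 : Int) := by
      simp only [List.getD, List.getElem?_append, List.length_map, List.length_range]
      rw [if_neg (by omega), Nat.sub_self]
      simp only [List.getElem?_drop, Nat.add_zero, List.getElem?_map]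
      rw [List.getElem?_range (by omega : k < n)]
      rfl
    rw [hPget, pvSetFill (f k) n _ (by simp)]
    rw [List.drop_replicate, Nat.sub_self]
    simp only [List.replicate_zero, List.append_nil]
    rw [List.set_append, if_neg (by simp)]
    simp only [List.length_map, List.length_range, Nat.sub_self]
    have hkl : k < ((List.range n).map (fun _ => List.replicate n (0 : Int))).length := by
      simpa using by omega
    have h := List.drop_eq_getElem_cons (l := (List.range n).map (fun _ => List.replicate n (0 : Int))) (i := k) hkl
    conv_lhs => rw [h]
    simp

theorem pvCofA_eq_map (matrix : List (List Int)) :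
    cofactor_matrix matrix = (List.range matrix.length).map (fun i =>
      (List.range matrix.length).map (fun j =>
        (-1 : Int)^(i+j) * determinant_matrix (minor_matrix matrix i j))) := by
  have h := pvFillAux matrix.length
    (fun i j => (-1 : Int)^(i+j) * determinant_matrix (minor_matrix matrix i j))
    matrix.length (le_refl _)
  rw [List.drop_eq_nil_of_le (by simp), List.append_nil] at h
  simpa [cofactor_matrix] using h

theorem cofactor_matrix_spec : Claim_unchanged_cofactor_matrix := by
  intro matrix _ hpre hnD
  rcases Nat.eq_zero_or_pos matrix.length with hz | hpos
  · rw [List.length_eq_zero_iff.mp hz]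
    simp [cofactor_matrix, cofactor_matrix_alt]
  · have hn2 : 2 ≤ matrix.length := by
      rcases Nat.lt_or_ge matrix.length 2 with h | h
      · exact absurd (show D_cofactor_matrix matrix by unfold D_cofactor_matrix; omega) hnD
      · exact h
    have hrows : ∀ row ∈ matrix, matrix.length ≤ row.length := by
      rcases hpre with h | h
      · exfalso; unfold D_cofactor_matrix at hnD; omega
      · exact h
    rw [pvCofA_eq_map]
    unfold cofactor_matrix_alt
    apply List.map_congr_left
    intro i hi
    apply List.map_congr_left
    intro j hj
    rw [List.mem_range] at hi hj
    congr 1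
    have hsub : pvSubmatrix matrix i j = minor_matrix matrix i j := rfl
    rw [hsub]
    apply pvDetAB (matrix.length - 1)
    · simp only [minor_matrix, List.length_map, List.length_append, List.length_take,
        List.length_drop]
      omega
    · intro row hrow
      simp only [minor_matrix, List.mem_map] at hrow
      obtain ⟨r, hr, rfl⟩ := hrow
      have hrm : r ∈ matrix := by
        rcases List.mem_append.mp hr with h | h
        · exact List.mem_of_mem_take h
        · exact List.mem_of_mem_drop h
      have hge := hrows r hrm
      simp only [List.length_append, List.length_take, List.length_drop]
      omega
    · omega

-- ===== VERDICT (by name: the statement is the Claim_ definition above) =====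
theorem cofactor_matrix_changed : Claim_changed_cofactor_matrix := by
  unfold Claim_changed_cofactor_matrix; decide

theorem cofactor_matrix_tight : Claim_exact_cofactor_matrix := by
  intro matrix _ _ hD
  obtain ⟨row, rfl⟩ := List.length_eq_one_iff.mp hD
  simp [cofactor_matrix, cofactor_matrix_alt, minor_matrix, pvSubmatrix,
    determinant_matrix, determinant_matrix_go, pvDetB, pvPermsGo, pvInversions,
    List.range_succ]
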